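-- pv_equiv track=rewrite | github.com/wya5217799/Multi-Agent-VSGs | probes/kundur/probe_state/_orchestrator.py | slice_targets
-- ===== SOURCE A (Python) =====
-- from typing import Any, Sequence
--
-- def slice_targets(
--     targets: Sequence[str],
--     n_workers: int,
--     strategy: str = "round_robin",
-- ) -> list[list[str]]:
--     """Split *targets* across *n_workers* slices (per spec §2.3 Decision 4.1).
--
--     Round-robin (S5): worker k receives targets[k::n_workers]. Yields
--     near-balanced load when targets have roughly equal cost.
--
--     For N > len(targets), some slices are empty. Caller MAY skip empty
--     slices in spawn (no point spawning a worker with nothing to do).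
--
--     Parameters
--     ----------
--     targets:
--         Ordered sequence of dispatch name strings.
--     n_workers:
--         Number of worker slices to produce. Must be >= 1.
--     strategy:
--         Slicing strategy. Only ``"round_robin"`` is supported.
--
--     Returns
--     -------
--     list[list[str]]
--         Length-n_workers list of sublists; some may be empty.
--
--     Raises
--     ------
--     ValueError
--         If n_workers < 1.
--     NotImplementedError
--         If strategy is not ``"round_robin"``.
--     """
--     if n_workers < 1:
--         raise ValueError(f"n_workers must be >= 1, got {n_workers}")
--     if strategy != "round_robin":
--         raise NotImplementedError(f"unsupported slicing strategy: {strategy!r}")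
--     n_workers = int(n_workers)
--     return [list(targets[k::n_workers]) for k in range(n_workers)]
-- ===== SOURCE B (Python) =====
-- def slice_targets(targets, n_workers, strategy="round_robin"):
--     if n_workers < 1:
--         raise ValueError(f"n_workers must be >= 1, got {n_workers}")
--     if strategy != "round_robin":
--         raise NotImplementedError(f"unsupported slicing strategy: {strategy!r}")
--     n_workers = int(n_workers)
--     buckets = [[] for _ in range(n_workers)]
--     i = 0
--     for t in targets:
--         buckets[i].append(t)
--         i += 1
--         if i == n_workers:
--             i = 0
--     return buckets
-- ===== Notes on version B (the rewrite author's own statement) =====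
-- stated objective: alternative
-- what changed: Replaces the n strided-slice comprehension targets[k::n] with a single distributing pass that appends each target to the bucket of a wrapping pointer.
import Mathlib
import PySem

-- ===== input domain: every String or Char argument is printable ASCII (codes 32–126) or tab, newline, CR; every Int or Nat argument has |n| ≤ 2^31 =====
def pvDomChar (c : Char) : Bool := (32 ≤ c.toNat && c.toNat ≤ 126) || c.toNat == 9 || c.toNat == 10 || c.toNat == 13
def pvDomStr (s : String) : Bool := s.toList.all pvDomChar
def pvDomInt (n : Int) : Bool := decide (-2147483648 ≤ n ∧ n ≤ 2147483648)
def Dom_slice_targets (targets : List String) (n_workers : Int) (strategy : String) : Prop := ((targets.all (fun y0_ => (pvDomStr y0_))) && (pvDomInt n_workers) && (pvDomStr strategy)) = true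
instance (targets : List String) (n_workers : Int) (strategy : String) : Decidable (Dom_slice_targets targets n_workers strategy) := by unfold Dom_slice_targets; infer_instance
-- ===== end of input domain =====

-- B replaces A's n strided slices targets[k::n] by one distributing pass with a
-- wrapping bucket pointer (alternative decomposition, same cost).

-- ===== PORT A =====
-- A raises ValueError / NotImplementedError on the two guards; those inputs are
-- outside Pre_slice_targets and the port returns [] there.
def slice_targets (targets : List String) (n_workers : Int) (strategy : String) : List (List String) :=
  if n_workers < 1 then []
  else if strategy ≠ "round_robin" then []
  else
    -- n_workers = int(n_workers) is the identity on Int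
    (PySem.List.pyRange 0 n_workers 1).map
      (fun k => (PySem.List.slice? targets (some k) none n_workers).getD [])

-- ===== PORT B =====
def slice_targets_alt (targets : List String) (n_workers : Int) (strategy : String) : List (List String) :=
  if n_workers < 1 then []
  else if strategy ≠ "round_robin" then []
  else
    (targets.foldl
      (fun (st : List (List String) × Int) t =>
        (st.1.modify st.2.toNat (fun b => b ++ [t]),
         if st.2 + 1 = n_workers then 0 else st.2 + 1))
      (List.replicate n_workers.toNat [], 0)).1

-- ===== PRECONDITION & SPEC =====
-- Pre_ excludes exactly the inputs on which A raises: n_workers < 1 (ValueError)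
-- and strategy ≠ "round_robin" (NotImplementedError).
def Pre_slice_targets (targets : List String) (n_workers : Int) (strategy : String) : Prop :=
  1 ≤ n_workers ∧ strategy = "round_robin"
instance (targets : List String) (n_workers : Int) (strategy : String) : Decidable (Pre_slice_targets targets n_workers strategy) := by unfold Pre_slice_targets; infer_instance

def pvWitness_slice_targets : List String × Int × String := (["g1", "g2", "g3"], 2, "round_robin")

def Spec_slice_targets (targets : List String) (n_workers : Int) (strategy : String) (out : List (List String)) : Prop := out = slice_targets_alt targets n_workers strategy
instance (targets : List String) (n_workers : Int) (strategy : String) (out : List (List String)) : Decidable (Spec_slice_targets targets n_workers strategy out) := by unfold Spec_slice_targets; infer_instance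

-- ===== CLAIM (what is proved, stated in full; the proofs are below) =====
def Claim_equal_slice_targets : Prop := ∀ (targets : List String) (n_workers : Int) (strategy : String), Dom_slice_targets targets n_workers strategy → Pre_slice_targets targets n_workers strategy → Spec_slice_targets targets n_workers strategy (slice_targets targets n_workers strategy)

-- ===== LEMMAS AND PROOFS =====

/-- The elements of `xs` at positions `k, k+n, k+2n, …` (what Python's
`xs[k::n]` selects, and what worker `k` of the round-robin split receives). -/
def takeEvery {α : Type} : List α → Nat → Nat → List α
  | [], _, _ => []
  | x :: t, k, n => if k = 0 then x :: takeEvery t (n - 1) n else takeEvery t (k - 1) n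

theorem takeEvery_of_le {α : Type} (xs : List α) (k n : Nat) (h : xs.length ≤ k) :
    takeEvery xs k n = [] := by
  induction xs generalizing k with
  | nil => rfl
  | cons x t ih =>
    simp only [List.length_cons] at h
    have hk : k ≠ 0 := by omega
    simp only [takeEvery, hk, if_false]
    exact ih _ (by omega)

theorem filt_eq_takeEvery {α : Type} (n : Nat) (hn : 0 < n) (xs : List α) :
    ∀ k : Nat,
      (List.range ((xs.length - k + n - 1) / n)).filterMap (fun m => xs[k + n * m]?) =
        takeEvery xs k n := by
  induction xs with
  | nil =>
    intro k
    have : (0 - k + n - 1) / n = 0 := Nat.div_eq_of_lt (by omega)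
    simp [this, takeEvery]
  | cons x t ih =>
    intro k
    rcases Nat.eq_zero_or_pos k with hk | hk
    · subst hk
      simp only [List.length_cons, Nat.sub_zero]
      have hcnt : (t.length + 1 + n - 1) / n = t.length / n + 1 := by
        have : t.length + 1 + n - 1 = t.length + n := by omega
        rw [this, Nat.add_div_right _ hn]
      have hcnt' : (t.length - (n - 1) + n - 1) / n = t.length / n := by
        rcases Nat.lt_or_ge t.length (n - 1) with h | h
        · have h1 : t.length - (n - 1) + n - 1 = n - 1 := by omega
          rw [h1, Nat.div_eq_of_lt (by omega), Nat.div_eq_of_lt (by omega)]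
        · have : t.length - (n - 1) + n - 1 = t.length := by omega
          rw [this]
      rw [hcnt, List.range_succ_eq_map, List.filterMap_cons]
      simp only [Nat.mul_zero, Nat.add_zero, List.getElem?_cons_zero, List.filterMap_map]
      have harg : ∀ m : Nat, (x :: t)[0 + n * (m + 1)]? = t[(n - 1) + n * m]? := by
        intro m
        have h1 : 0 + n * (m + 1) = ((n - 1) + n * m) + 1 := by
          rw [Nat.mul_succ]; omega
        rw [h1, List.getElem?_cons_succ]
      simp only [Function.comp_def, harg]
      rw [← hcnt', ih (n - 1)]
      simp [takeEvery]
    · have hk0 : k ≠ 0 := by omega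
      have hcnt : (t.length + 1 - k + n - 1) / n = (t.length - (k - 1) + n - 1) / n := by
        congr 1
        omega
      have harg : ∀ m : Nat, (x :: t)[k + n * m]? = t[(k - 1) + n * m]? := by
        intro m
        have h1 : k + n * m = ((k - 1) + n * m) + 1 := by omega
        rw [h1, List.getElem?_cons_succ]
      simp only [List.length_cons, hcnt, harg]
      rw [ih (k - 1)]
      simp [takeEvery, hk0]

theorem slice?_pos_eq {α : Type} (xs : List α) (k n : Nat) (hn : 0 < n) :
    PySem.List.slice? xs (some (k : Int)) none (n : Int) = some (takeEvery xs k n) := by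
  have hn0 : (n : Int) ≠ 0 := by exact_mod_cast hn.ne'
  have hnneg : ¬ ((n : Int) < 0) := not_lt.mpr (Int.natCast_nonneg n)
  have hknn : ¬ ((k : Int) < 0) := not_lt.mpr (Int.natCast_nonneg k)
  simp only [PySem.List.slice?, PySem.List.sliceIndices, hn0, if_false, hnneg, hknn,
    if_pos (show (0 : Int) < n by exact_mod_cast hn)]
  rcases Nat.lt_or_ge k xs.length with hlt | hge
  · have hmin : min (k : Int) (xs.length : Int) = (k : Int) := by
      apply min_eq_left; exact_mod_cast hlt.le
    have hlt' : (k : Int) < (xs.length : Int) := by exact_mod_cast hlt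
    have hcnt : (((xs.length : Int) - k + n - 1) / n).toNat = (xs.length - k + n - 1) / n := by
      have h1 : ((xs.length : Int) - k + n - 1) = ((xs.length - k + n - 1 : Nat) : Int) := by
        push_cast; omega
      rw [h1, ← Int.natCast_div, Int.toNat_natCast]
    have harg : ∀ m : Nat, ((k : Int) + n * m).toNat = k + n * m := by
      intro m
      have : ((k : Int) + n * m) = ((k + n * m : Nat) : Int) := by push_cast; ring
      rw [this, Int.toNat_natCast]
    simp only [hmin, if_pos hlt', hcnt, harg]
    rw [filt_eq_takeEvery n hn xs k]
  · have hmin : min (k : Int) (xs.length : Int) = (xs.length : Int) := by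
      apply min_eq_right; exact_mod_cast hge
    have : ¬ ((xs.length : Int) < (xs.length : Int)) := lt_irrefl _
    simp only [hmin, this, if_false, List.range_zero, List.filterMap_nil]
    rw [takeEvery_of_le xs k n hge]

/-- Distance from pointer `p` to bucket `j` along the wrapping order (both `< n`). -/
def distP (p j n : Nat) : Nat := if p ≤ j then j - p else j + n - p

theorem foldB {n : Nat} (hn : 0 < n) (xs : List String) :
    ∀ (p : Nat), p < n → ∀ (bs : List (List String)), bs.length = n →
      (xs.foldl
        (fun (st : List (List String) × Int) t =>
          (st.1.modify st.2.toNat (fun b => b ++ [t]),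
           if st.2 + 1 = (n : Int) then 0 else st.2 + 1))
        (bs, ((p : Nat) : Int))).1 =
      (List.range n).map (fun j => bs.getD j [] ++ takeEvery xs (distP p j n) n) := by
  induction xs with
  | nil =>
    intro p hp bs hb
    simp only [List.foldl_nil, takeEvery, List.append_nil]
    apply List.ext_getElem
    · simp [hb]
    · intro i h1 h2
      simp only [List.getElem_map, List.getElem_range]
      rw [List.getD_eq_getElem bs [] (by omega)]
  | cons x t ih =>
    intro p hp bs hb
    have hpt : ((p : Int)).toNat = p := Int.toNat_natCast p
    have hptr : (if (p : Int) + 1 = (n : Int) then (0 : Int) else (p : Int) + 1) =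
        ((if p + 1 = n then 0 else p + 1 : Nat) : Int) := by
      by_cases h : p + 1 = n
      · rw [if_pos (by exact_mod_cast h), if_pos h]; rfl
      · rw [if_neg (by exact_mod_cast h), if_neg h]; norm_cast
    simp only [List.foldl_cons, hpt, hptr]
    rw [ih (if p + 1 = n then 0 else p + 1) (by split_ifs <;> omega)
        (bs.modify p (fun b => b ++ [x])) (by simpa using hb)]
    apply List.map_congr_left
    intro j hj
    have hjn : j < n := List.mem_range.mp hj
    by_cases hjp : j = p
    · subst hjp
      have hget : (bs.modify j (fun b => b ++ [x])).getD j [] = bs.getD j [] ++ [x] := by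
        have hjl : j < bs.length := by omega
        rw [List.getD_eq_getElem _ [] (by simpa using hjl),
            List.getD_eq_getElem bs [] hjl, List.getElem_modify]
        simp
      have hd0 : distP j j n = 0 := by simp [distP]
      have hd1 : distP (if j + 1 = n then 0 else j + 1) j n = n - 1 := by
        unfold distP; split_ifs <;> omega
      rw [hget, hd0, hd1]
      simp only [takeEvery, if_pos rfl]
      rw [List.append_assoc]
      rfl
    · have hget : (bs.modify p (fun b => b ++ [x])).getD j [] = bs.getD j [] := by
        have hjl : j < bs.length := by omega
        rw [List.getD_eq_getElem _ [] (by simpa using hjl),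
            List.getD_eq_getElem bs [] hjl, List.getElem_modify]
        simp [Ne.symm hjp]
      have hdne : distP p j n ≠ 0 := by unfold distP; split_ifs <;> omega
      have hd1 : distP (if p + 1 = n then 0 else p + 1) j n = distP p j n - 1 := by
        unfold distP; split_ifs <;> omega
      rw [hget, hd1]
      simp only [takeEvery, hdne, if_false]

theorem pyRange_zero_pos (n : Nat) (hn : 0 < n) :
    PySem.List.pyRange 0 (n : Int) 1 = (List.range n).map (fun i : Nat => (i : Int)) := by
  rw [PySem.List.pyRange_of_pos 0 (n : Int) (by norm_num)]
  have h0 : (0 : Int) < (n : Int) := by exact_mod_cast hn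
  have hcnt : (if (0 : Int) < (n : Int) then (((n : Int) - 0 + 1 - 1) / 1).toNat else 0) = n := by
    rw [if_pos h0]
    norm_num
  rw [hcnt]
  apply List.map_congr_left
  intro i _
  push_cast
  ring

-- ===== VERDICT (by name: the statement is the Claim_ definition above) =====
theorem slice_targets_spec : Claim_equal_slice_targets := by
  intro targets n_workers strategy _ hpre
  obtain ⟨hn, hs⟩ := hpre
  unfold Spec_slice_targets slice_targets slice_targets_alt
  have hlt : ¬ (n_workers < 1) := by omega
  subst hs
  have h2 : ¬ ("round_robin" ≠ "round_robin") := by simp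
  rw [if_neg hlt, if_neg h2, if_neg hlt, if_neg h2]
  set N : Nat := n_workers.toNat with hN
  have hcast : ((N : Nat) : Int) = n_workers := Int.toNat_of_nonneg (by omega)
  have hNpos : 0 < N := by omega
  rw [← hcast]
  -- A side
  rw [pyRange_zero_pos N hNpos, List.map_map]
  have hA : ∀ k ∈ List.range N,
      ((fun k => (PySem.List.slice? targets (some k) none ((N : Nat) : Int)).getD []) ∘
        (fun i : Nat => (i : Int))) k = (fun k : Nat => takeEvery targets k N) k := by
    intro k _
    simp only [Function.comp_def]
    rw [slice?_pos_eq targets k N hNpos]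
    rfl
  rw [List.map_congr_left hA]
  -- B side
  have hfold := foldB hNpos targets 0 hNpos (List.replicate N []) List.length_replicate
  simp only [Nat.cast_zero] at hfold
  rw [hfold]
  apply List.map_congr_left
  intro j hj
  have hjN : j < N := List.mem_range.mp hj
  rw [List.getD_eq_getElem _ [] (by simpa using hjN)]
  simp [distP]
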